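-- pv_equiv track=rewrite | github.com/jhonnyzta/TrabajoEstadistica | src/extra/__init__.py | create_set_data
-- ===== SOURCE A (Python) =====
-- def create_set_data(data):
--     data_by_country = {}
--     for row in data:
--         country = row[0]
--         gender = row[1]
--         urban = row[3]
--         rural = row[4]
--
--         if country not in data_by_country:
--             data_by_country[country] = {'urban_men': [], 'urban_women': [],
--                                     'rural_men': [], 'rural_women': []}
--
--         if gender == 'Men':
--             data_by_country[country]['urban_men'].append(urban)
--             data_by_country[country]['rural_men'].append(rural)
--         elif gender == 'Women':
--             data_by_country[country]['urban_women'].append(urban)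
--             data_by_country[country]['rural_women'].append(rural)
--     return data_by_country
-- ===== SOURCE B (Python) =====
-- def create_set_data(data):
--     countries = list(dict.fromkeys(row[0] for row in data))
--     result = {}
--     for c in countries:
--         rows = [(g, u, r) for k, g, _, u, r, *_ in data if k == c]
--         result[c] = {
--             'urban_men':   [u for g, u, r in rows if g == 'Men'],
--             'urban_women': [u for g, u, r in rows if g == 'Women'],
--             'rural_men':   [r for g, u, r in rows if g == 'Men'],
--             'rural_women': [r for g, u, r in rows if g == 'Women'],
--         }
--     return result
-- ===== Notes on version B (the rewrite author's own statement) =====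
-- stated objective: alternative
-- what changed: A builds the nested result in a single mutating pass that conditionally inserts a default entry and appends per row; B first deduplicates the country column (dict.fromkeys) and then builds each country's four lists declaratively with filter/map comprehensions over that country's rows.
import Mathlib
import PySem

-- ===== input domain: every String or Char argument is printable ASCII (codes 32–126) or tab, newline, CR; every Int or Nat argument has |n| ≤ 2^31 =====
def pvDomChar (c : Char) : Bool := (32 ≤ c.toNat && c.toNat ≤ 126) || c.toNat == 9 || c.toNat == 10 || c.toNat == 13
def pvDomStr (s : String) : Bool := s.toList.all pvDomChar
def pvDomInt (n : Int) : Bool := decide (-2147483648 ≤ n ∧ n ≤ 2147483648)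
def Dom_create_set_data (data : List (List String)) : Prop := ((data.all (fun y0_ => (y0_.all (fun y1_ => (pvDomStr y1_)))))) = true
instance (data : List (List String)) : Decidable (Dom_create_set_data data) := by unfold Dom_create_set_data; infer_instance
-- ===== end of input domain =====

-- B replaces A's single mutating pass with dedup-of-countries + declarative per-country filter/map comprehensions (objective: alternative; return value only — neither version mutates its argument).

-- ===== PORT A =====
def csdDefault : PySem.Dict String (List String) :=
  PySem.Dict.ofList [("urban_men", []), ("urban_women", []), ("rural_men", []), ("rural_women", [])]

def csdStep (d : PySem.Dict String (PySem.Dict String (List String))) (row : List String) :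
    PySem.Dict String (PySem.Dict String (List String)) :=
  let country := PySem.List.pyGetD row (0:Int) ""
  let gender := PySem.List.pyGetD row (1:Int) ""
  let urban := PySem.List.pyGetD row (3:Int) ""
  let rural := PySem.List.pyGetD row (4:Int) ""
  let d1 := if d.contains country then d else d.insert country csdDefault
  if gender == "Men" then
    d1.modify country PySem.Dict.empty
      (fun e => (e.modify "urban_men" [] (· ++ [urban])).modify "rural_men" [] (· ++ [rural]))
  else if gender == "Women" then
    d1.modify country PySem.Dict.empty
      (fun e => (e.modify "urban_women" [] (· ++ [urban])).modify "rural_women" [] (· ++ [rural]))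
  else d1

def create_set_data (data : List (List String)) : List (String × List (String × List String)) :=
  ((data.foldl csdStep PySem.Dict.empty).items).map (fun p => (p.1, p.2.items))

-- ===== PORT B =====
-- a row unpacked 'k, g, _, u, r, *_' becomes the triple (g, u, r); total via pyGetD, exact under Pre_ (row length ≥ 5)
def altRow (row : List String) : String × String × String :=
  (PySem.List.pyGetD row (1:Int) "", PySem.List.pyGetD row (3:Int) "", PySem.List.pyGetD row (4:Int) "")

def altEntry (rows : List (String × String × String)) : List (String × List String) :=
  [("urban_men",   (rows.filter (fun t => t.1 == "Men")).map (fun t => t.2.1)),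
   ("urban_women", (rows.filter (fun t => t.1 == "Women")).map (fun t => t.2.1)),
   ("rural_men",   (rows.filter (fun t => t.1 == "Men")).map (fun t => t.2.2)),
   ("rural_women", (rows.filter (fun t => t.1 == "Women")).map (fun t => t.2.2))]

def create_set_data_alt (data : List (List String)) : List (String × List (String × List String)) :=
  let countries := PySem.List.dedup (data.map (fun r => PySem.List.pyGetD r (0:Int) ""))
  ((countries.foldl
      (fun acc c => acc.insert c (altEntry
        ((data.filter (fun r => PySem.List.pyGetD r (0:Int) "" == c)).map altRow)))
      PySem.Dict.empty).items)

-- ===== PRECONDITION & SPEC =====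
-- Pre_ excludes exactly the inputs on which Python A raises IndexError: a row shorter than 5 (A reads row[0], row[1], row[3], row[4]).
def Pre_create_set_data (data : List (List String)) : Prop := ∀ row ∈ data, 5 ≤ row.length
instance (data : List (List String)) : Decidable (Pre_create_set_data data) := by unfold Pre_create_set_data; infer_instance

def pvWitness_create_set_data : List (List String) :=
  [["Chile", "Men", "1990", "10", "20"], ["Chile", "Women", "1990", "11", "21"], ["Peru", "Other", "1990", "1", "2"]]

def Spec_create_set_data (data : List (List String)) (out : List (String × List (String × List String))) : Prop := out = create_set_data_alt data
instance (data : List (List String)) (out : List (String × List (String × List String))) : Decidable (Spec_create_set_data data out) := by unfold Spec_create_set_data; infer_instance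

-- ===== CLAIM (what is proved, stated in full; the proofs are below) =====
def Claim_equal_create_set_data : Prop := ∀ (data : List (List String)), Dom_create_set_data data → Pre_create_set_data data → Spec_create_set_data data (create_set_data data)

-- ===== LEMMAS AND PROOFS =====

def countryOf (row : List String) : String := PySem.List.pyGetD row (0:Int) ""

def csdInner (e : PySem.Dict String (List String)) (row : List String) : PySem.Dict String (List String) :=
  if PySem.List.pyGetD row (1:Int) "" == "Men" then
    (e.modify "urban_men" [] (· ++ [PySem.List.pyGetD row (3:Int) ""])).modify "rural_men" [] (· ++ [PySem.List.pyGetD row (4:Int) ""])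
  else if PySem.List.pyGetD row (1:Int) "" == "Women" then
    (e.modify "urban_women" [] (· ++ [PySem.List.pyGetD row (3:Int) ""])).modify "rural_women" [] (· ++ [PySem.List.pyGetD row (4:Int) ""])
  else e

theorem step_contains (d : PySem.Dict String (PySem.Dict String (List String))) (row : List String) (c : String) :
    (csdStep d row).contains c = (c == countryOf row || d.contains c) := by
  unfold csdStep countryOf
  dsimp only
  split_ifs with h1 h2 h3 <;>
    simp [PySem.Dict.contains_modify, PySem.Dict.contains_insert] <;>
    (intro hc; subst hc; assumption)

theorem step_getD_ne (d : PySem.Dict String (PySem.Dict String (List String))) (row : List String) (c : String)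
    (h : c ≠ countryOf row) :
    (csdStep d row).getD c PySem.Dict.empty = d.getD c PySem.Dict.empty := by
  unfold csdStep countryOf at *
  dsimp only
  split_ifs with h1 h2 h3 <;>
    simp [PySem.Dict.getD_modify, PySem.Dict.getD_insert, h]

theorem step_getD_self_of_contains (d : PySem.Dict String (PySem.Dict String (List String))) (row : List String)
    (h : d.contains (countryOf row) = true) :
    (csdStep d row).getD (countryOf row) PySem.Dict.empty = csdInner (d.getD (countryOf row) PySem.Dict.empty) row := by
  unfold csdStep csdInner countryOf at *
  dsimp only
  split_ifs with h1 h2 h3 <;> simp_all [PySem.Dict.getD_modify]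

theorem step_getD_self_of_not (d : PySem.Dict String (PySem.Dict String (List String))) (row : List String)
    (h : d.contains (countryOf row) = false) :
    (csdStep d row).getD (countryOf row) PySem.Dict.empty = csdInner csdDefault row := by
  unfold csdStep csdInner countryOf at *
  dsimp only
  split_ifs with h1 h2 h3 <;> simp_all [PySem.Dict.getD_modify, PySem.Dict.getD_insert]

theorem step_keys (d : PySem.Dict String (PySem.Dict String (List String))) (row : List String) :
    (csdStep d row).keys = PySem.Set.add d.keys (countryOf row) := by
  unfold csdStep countryOf
  dsimp only
  have hc : d.contains (PySem.List.pyGetD row (0:Int) "") = PySem.Set.contains d.keys (PySem.List.pyGetD row (0:Int) "") := by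
    simp [PySem.Set.contains, PySem.Dict.contains_eq_decide_mem_keys]
  split_ifs with h1 h2 h3 <;>
    simp_all [PySem.Dict.keys_modify, PySem.Set.add, PySem.Dict.keys_insert_of_contains,
      PySem.Dict.keys_insert_of_not_contains]

theorem foldl_keys (l : List (List String)) (d : PySem.Dict String (PySem.Dict String (List String))) :
    (l.foldl csdStep d).keys = PySem.Set.update d.keys (l.map countryOf) := by
  induction l generalizing d with
  | nil => simp [PySem.Set.update]
  | cons row rest ih =>
    simp only [List.foldl_cons, List.map_cons, ih, step_keys, PySem.Set.update]

theorem foldl_getD_of_contains (l : List (List String)) (d : PySem.Dict String (PySem.Dict String (List String)))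
    (c : String) (h : d.contains c = true) :
    (l.foldl csdStep d).getD c PySem.Dict.empty
      = (l.filter (fun r => countryOf r == c)).foldl csdInner (d.getD c PySem.Dict.empty) := by
  induction l generalizing d with
  | nil => simp
  | cons row rest ih =>
    by_cases hc : countryOf row = c
    · subst hc
      have h2 : (csdStep d row).contains (countryOf row) = true := by
        simp [step_contains]
      rw [List.foldl_cons, ih _ h2, step_getD_self_of_contains d row h]
      simp
    · have h2 : (csdStep d row).contains c = true := by
        simp [step_contains, h]
      rw [List.foldl_cons, ih _ h2, step_getD_ne d row c (Ne.symm hc)]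
      simp [List.filter_cons, hc]

theorem foldl_getD_of_not (l : List (List String)) (d : PySem.Dict String (PySem.Dict String (List String)))
    (c : String) (h : d.contains c = false) (hm : c ∈ l.map countryOf) :
    (l.foldl csdStep d).getD c PySem.Dict.empty
      = (l.filter (fun r => countryOf r == c)).foldl csdInner csdDefault := by
  induction l generalizing d with
  | nil => simp at hm
  | cons row rest ih =>
    by_cases hc : countryOf row = c
    · subst hc
      have h2 : (csdStep d row).contains (countryOf row) = true := by
        simp [step_contains]
      rw [List.foldl_cons, foldl_getD_of_contains _ _ _ h2, step_getD_self_of_not d row h]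
      simp
    · have h2 : (csdStep d row).contains c = false := by
        simp [step_contains, h, Ne.symm hc]
      have hm2 : c ∈ rest.map countryOf := by
        simp only [List.map_cons, List.mem_cons] at hm
        exact hm.resolve_left (Ne.symm hc)
      rw [List.foldl_cons, ih _ h2 hm2]
      simp [List.filter_cons, hc]

def mk4 (a b c d : List String) : PySem.Dict String (List String) :=
  PySem.Dict.ofList [("urban_men", a), ("urban_women", b), ("rural_men", c), ("rural_women", d)]

theorem inner_step (a b c d : List String) (row : List String) :
    csdInner (mk4 a b c d) row =
      if PySem.List.pyGetD row (1:Int) "" == "Men" then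
        mk4 (a ++ [PySem.List.pyGetD row (3:Int) ""]) b (c ++ [PySem.List.pyGetD row (4:Int) ""]) d
      else if PySem.List.pyGetD row (1:Int) "" == "Women" then
        mk4 a (b ++ [PySem.List.pyGetD row (3:Int) ""]) c (d ++ [PySem.List.pyGetD row (4:Int) ""])
      else mk4 a b c d := by
  unfold csdInner mk4
  split_ifs <;> rfl

theorem inner_foldl (rows : List (List String)) (a b c d : List String) :
    rows.foldl csdInner (mk4 a b c d) =
      mk4 (a ++ (rows.filter (fun r => PySem.List.pyGetD r (1:Int) "" == "Men")).map (fun r => PySem.List.pyGetD r (3:Int) ""))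
          (b ++ (rows.filter (fun r => PySem.List.pyGetD r (1:Int) "" == "Women")).map (fun r => PySem.List.pyGetD r (3:Int) ""))
          (c ++ (rows.filter (fun r => PySem.List.pyGetD r (1:Int) "" == "Men")).map (fun r => PySem.List.pyGetD r (4:Int) ""))
          (d ++ (rows.filter (fun r => PySem.List.pyGetD r (1:Int) "" == "Women")).map (fun r => PySem.List.pyGetD r (4:Int) "")) := by
  induction rows generalizing a b c d with
  | nil => simp
  | cons row rest ih =>
    rw [List.foldl_cons, inner_step]
    split_ifs with h1 h2
    · simp only [beq_iff_eq] at h1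
      simp [List.filter_cons, h1, ih]
    · simp only [beq_iff_eq] at h2
      simp [List.filter_cons, h1, h2, ih]
    · simp [List.filter_cons, h1, h2, ih]

theorem inner_items (rows : List (List String)) :
    (rows.foldl csdInner csdDefault).items = altEntry (rows.map altRow) := by
  have h0 : csdDefault = mk4 [] [] [] [] := rfl
  rw [h0, inner_foldl]
  simp [altEntry, altRow, mk4, List.filter_map, Function.comp_def]
  rfl

theorem ports_agree (data : List (List String)) : create_set_data data = create_set_data_alt data := by
  unfold create_set_data create_set_data_alt
  dsimp only
  have hkeys : (data.foldl csdStep PySem.Dict.empty).keys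
      = PySem.Set.ofList (data.map countryOf) := by
    rw [foldl_keys, PySem.Dict.keys_empty, PySem.Set.ofList_eq_foldl]
    rfl
  have hnd : ((data.foldl csdStep PySem.Dict.empty).keys).Nodup := by
    rw [hkeys]
    exact PySem.Set.nodup_ofList _
  rw [PySem.Dict.items_eq_map_keys _ hnd PySem.Dict.empty, List.map_map, hkeys]
  rw [PySem.Dict.items_foldl_insert_fresh _ (fun c => c) _ PySem.Dict.empty
        (by intro a _; exact PySem.Dict.contains_empty a)
        (by simpa using PySem.List.nodup_dedup (data.map (fun r => PySem.List.pyGetD r (0:Int) "")))]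
  rw [PySem.List.dedup_eq_ofList]
  have hc : (data.map (fun r => PySem.List.pyGetD r (0:Int) "")) = data.map countryOf := rfl
  rw [hc]
  have hemp : (PySem.Dict.empty : PySem.Dict String (List (String × List String))).items = [] := rfl
  rw [hemp, List.nil_append]
  apply List.map_congr_left
  intro c hcmem
  have hmem : c ∈ data.map countryOf := (PySem.Set.mem_ofList _ _).mp hcmem
  have hgd := foldl_getD_of_not data PySem.Dict.empty c (PySem.Dict.contains_empty c) hmem
  simp only [Function.comp_apply, hgd, inner_items]
  rfl

-- ===== VERDICT (by name: the statement is the Claim_ definition above) =====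
theorem create_set_data_spec : Claim_equal_create_set_data := by
  intro data _ _
  unfold Spec_create_set_data
  exact ports_agree data
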